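-- pv_equiv track=rewrite | github.com/MadukaPcm/interview-prep-programs | python/practise/splitlist_equal_sum.py | split_array_equal_sum
-- ===== SOURCE A (Python) =====
-- def split_array_equal_sum(arr):
--   total_sum = sum(arr)
--
--   if total_sum % 2 != 0:
--     return None
--
--   target_sum = total_sum // 2  # Target sum for each part
--   left_sum = 0  # Initialize left sum
--
--   # Iterate through the array to find the split point
--   for i in range(len(arr)):
--     left_sum += arr[i]  # Add the current element to the left sum
--
--     # If the left sum equals the target sum, return the split point
--     if left_sum == target_sum:
--       return i  # Return the index where the array can be split
--
--   # If no split point is found, return None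
--   return None
-- ===== SOURCE B (Python) =====
-- def split_array_equal_sum(arr):
--     # Build the table of running prefix sums, then search it for the target.
--     prefix = []
--     acc = 0
--     for x in arr:
--         acc += x
--         prefix.append(acc)
--     total_sum = prefix[-1] if prefix else 0
--     if total_sum % 2 != 0:
--         return None
--     target_sum = total_sum // 2
--     return prefix.index(target_sum) if target_sum in prefix else None
-- ===== Notes on version B (the rewrite author's own statement) =====
-- stated objective: alternative
-- what changed: A fuses summing and searching into one early-return loop; B first materialises the prefix-sum table (reading the total as its last entry), then finds the split point with a separate membership-plus-index search.
import Mathlib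
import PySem

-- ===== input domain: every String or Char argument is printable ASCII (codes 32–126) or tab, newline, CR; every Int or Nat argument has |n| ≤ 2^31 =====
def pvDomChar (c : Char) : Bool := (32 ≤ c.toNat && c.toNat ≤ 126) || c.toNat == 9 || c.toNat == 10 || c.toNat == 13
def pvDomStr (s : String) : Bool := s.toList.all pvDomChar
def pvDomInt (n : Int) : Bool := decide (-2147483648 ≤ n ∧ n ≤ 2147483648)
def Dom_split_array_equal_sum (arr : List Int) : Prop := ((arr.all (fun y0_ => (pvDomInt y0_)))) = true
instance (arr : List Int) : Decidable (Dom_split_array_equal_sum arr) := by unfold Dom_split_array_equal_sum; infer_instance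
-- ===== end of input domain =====

-- B replaces A's fused accumulate-and-test early-return loop by building the prefix-sum
-- table first (total = its last entry) and then searching it with membership + index
-- (objective: alternative decomposition, same cost).

-- ===== PORT A =====
-- the for-loop of A: running left_sum, early return of the index
def pvLoopA (xs : List Int) (target left i : Int) : Option Int :=
  match xs with
  | [] => none
  | x :: rest =>
    let l := left + x
    if l = target then some i else pvLoopA rest target l (i + 1)

def split_array_equal_sum (arr : List Int) : Option Int :=
  let total_sum := arr.sum
  if PySem.Int.mod total_sum 2 ≠ 0 then none
  else pvLoopA arr (PySem.Int.floordiv total_sum 2) 0 0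

-- ===== PORT B =====
-- the prefix-building loop of B
def pvPrefixes (xs : List Int) (acc : Int) : List Int :=
  match xs with
  | [] => []
  | x :: rest => (acc + x) :: pvPrefixes rest (acc + x)

def split_array_equal_sum_alt (arr : List Int) : Option Int :=
  let pfx := pvPrefixes arr 0
  let total_sum := match pfx.getLast? with | some t => t | none => 0   -- prefix[-1] if prefix else 0
  if PySem.Int.mod total_sum 2 ≠ 0 then none
  else
    let target_sum := PySem.Int.floordiv total_sum 2
    if target_sum ∈ pfx then (PySem.List.index? pfx target_sum).map (fun n => (n : Int))
    else none

-- ===== PRECONDITION & SPEC =====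
def Spec_split_array_equal_sum (arr : List Int) (out : Option Int) : Prop := out = split_array_equal_sum_alt arr
instance (arr : List Int) (out : Option Int) : Decidable (Spec_split_array_equal_sum arr out) := by unfold Spec_split_array_equal_sum; infer_instance

-- ===== CLAIM (what is proved, stated in full; the proofs are below) =====
def Claim_equal_split_array_equal_sum : Prop := ∀ (arr : List Int), Dom_split_array_equal_sum arr → Spec_split_array_equal_sum arr (split_array_equal_sum arr)

-- ===== LEMMAS AND PROOFS =====

-- the last prefix sum (or the seed for the empty table) is seed + total sum
theorem pvPrefixes_last (xs : List Int) (acc : Int) :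
    ((pvPrefixes xs acc).getLast?).getD acc = acc + xs.sum := by
  induction xs generalizing acc with
  | nil => simp [pvPrefixes]
  | cons x rest ih =>
    have h2 := ih (acc + x)
    simp only [pvPrefixes, List.sum_cons, List.getLast?_cons, Option.getD_some] at *
    omega

-- A's loop finds the first index where the running sum hits target = index? into the prefix table
theorem pvLoopA_eq_index (xs : List Int) (target left i : Int) :
    pvLoopA xs target left i
      = (PySem.List.index? (pvPrefixes xs left) target).map (fun n => i + (n : Int)) := by
  induction xs generalizing left i with
  | nil => simp [pvLoopA, pvPrefixes, PySem.List.index?]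
  | cons x rest ih =>
    simp only [pvLoopA, pvPrefixes]
    by_cases h : left + x = target
    · rw [if_pos h, h, PySem.List.index?_cons_self]
      simp
    · rw [if_neg h, PySem.List.index?_cons_of_ne _ h, ih (left + x) (i + 1)]
      cases PySem.List.index? (pvPrefixes rest (left + x)) target with
      | none => rfl
      | some n =>
        simp only [Option.map_some]
        simp
        ring

-- ===== VERDICT (by name: the statement is the Claim_ definition above) =====
theorem split_array_equal_sum_spec : Claim_equal_split_array_equal_sum := by
  intro arr _
  unfold Spec_split_array_equal_sum
  simp only [split_array_equal_sum, split_array_equal_sum_alt]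
  have htot : (match (pvPrefixes arr 0).getLast? with | some t => t | none => (0 : Int)) = arr.sum := by
    have hl := pvPrefixes_last arr 0
    cases hg : (pvPrefixes arr 0).getLast? <;> rw [hg] at hl <;> simpa using hl
  rw [htot]
  by_cases hpar : PySem.Int.mod arr.sum 2 ≠ 0
  · rw [if_pos hpar, if_pos hpar]
  · rw [if_neg hpar, if_neg hpar, pvLoopA_eq_index]
    by_cases hmem : PySem.Int.floordiv arr.sum 2 ∈ pvPrefixes arr 0
    · rw [if_pos hmem]
      simp
    · rw [if_neg hmem, (PySem.List.index?_eq_none_iff _ _).mpr hmem]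
      rfl
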